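-- pv_equiv track=rewrite | github.com/fergplace/amber_scripts | pdb_splitter.py | pdb_split
-- ===== SOURCE A (Python) =====
-- def pdb_split(pdb_data, option) -> list:
--
--     #ignore HET and other line starts:
--     ter_state = 0
--     records = ('ATOM', 'ANISOU', 'TER')
--     data = []
--
--     for line in pdb_data:
--         if line.startswith(records):
--             if (option == 0) and (ter_state==0)  :
--                 data.append(line)
--
--                 if line.startswith('TER') :
--                     return data #break once we get to first Ter as option 0
--
--             #need to check for Ter after store line starting with Ter due to structure
--             #of pdb files, TER line belongs to structure.
--             if line.startswith('TER') and (ter_state==0) :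
--                 ter_state =1
--                 continue
--             if (option == 1 ) and (ter_state==1):
--                 data.append(line)
--
--     return data
-- ===== SOURCE B (Python) =====
-- def pdb_split(pdb_data, option):
--     recs = [l for l in pdb_data if l.startswith(('ATOM', 'ANISOU', 'TER'))]
--     idx = next((i for i, l in enumerate(recs) if l.startswith('TER')), None)
--     if option == 0:
--         return recs if idx is None else recs[:idx + 1]
--     if option == 1:
--         return [] if idx is None else recs[idx + 1:]
--     return []
-- ===== Notes on version B (the rewrite author's own statement) =====
-- stated objective: simpler
-- what changed: Replaces the stateful single-pass loop with early return and a ter_state flag by a filter-then-split decomposition: filter the record lines once, find the index of the first TER, and slice before/after it according to the option.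
import Mathlib
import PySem

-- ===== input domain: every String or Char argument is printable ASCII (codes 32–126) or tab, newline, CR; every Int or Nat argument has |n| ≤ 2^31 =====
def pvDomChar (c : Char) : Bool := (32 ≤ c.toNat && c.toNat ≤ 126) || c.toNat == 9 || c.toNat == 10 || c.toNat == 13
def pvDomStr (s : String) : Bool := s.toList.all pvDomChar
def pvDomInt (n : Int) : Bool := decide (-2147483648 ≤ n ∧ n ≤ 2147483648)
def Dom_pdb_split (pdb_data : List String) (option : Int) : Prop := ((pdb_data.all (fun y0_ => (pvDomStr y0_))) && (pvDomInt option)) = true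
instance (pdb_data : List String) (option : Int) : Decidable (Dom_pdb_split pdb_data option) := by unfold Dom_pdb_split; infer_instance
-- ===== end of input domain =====

-- ===== PORT A =====
-- B differs from A by decomposition: one filtered pass then a split at the first TER,
-- instead of A's stateful loop with a ter_state flag and an early return.
-- line.startswith(('ATOM', 'ANISOU', 'TER'))
def startsRec (line : String) : Bool :=
  PySem.Str.startswith line "ATOM" || PySem.Str.startswith line "ANISOU" || PySem.Str.startswith line "TER"

-- A's for-loop over pdb_data with state (ter_state, data) and the early return in the option-0 branch.
def pdbLoopA (option : Int) (ter_state : Int) (data : List String) : List String → List String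
  | [] => data
  | line :: rest =>
    if startsRec line then
      if option == 0 && ter_state == 0 then
        let data1 := data ++ [line]
        if PySem.Str.startswith line "TER" then data1   -- early return
        else
          if PySem.Str.startswith line "TER" && ter_state == 0 then pdbLoopA option 1 data1 rest
          else if option == 1 && ter_state == 1 then pdbLoopA option ter_state (data1 ++ [line]) rest
          else pdbLoopA option ter_state data1 rest
      else
        if PySem.Str.startswith line "TER" && ter_state == 0 then pdbLoopA option 1 data rest
        else if option == 1 && ter_state == 1 then pdbLoopA option ter_state (data ++ [line]) rest
        else pdbLoopA option ter_state data rest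
    else pdbLoopA option ter_state data rest

def pdb_split (pdb_data : List String) (option : Int) : List String :=
  pdbLoopA option 0 [] pdb_data

-- ===== PORT B =====
-- B: filter the record lines, locate the first TER, slice before/after it.
-- recs[:idx+1] / recs[idx+1:] with idx ≥ 0 are List.take / List.drop (idx+1).
def pdb_split_alt (pdb_data : List String) (option : Int) : List String :=
  let recs := pdb_data.filter startsRec
  let idx := recs.findIdx? (fun l => PySem.Str.startswith l "TER")
  if option == 0 then
    match idx with
    | none => recs
    | some i => recs.take (i + 1)
  else if option == 1 then
    match idx with
    | none => []
    | some i => recs.drop (i + 1)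
  else []

-- ===== PRECONDITION & SPEC =====
def Spec_pdb_split (pdb_data : List String) (option : Int) (out : List String) : Prop := out = pdb_split_alt pdb_data option
instance (pdb_data : List String) (option : Int) (out : List String) : Decidable (Spec_pdb_split pdb_data option out) := by unfold Spec_pdb_split; infer_instance

-- ===== CLAIM (what is proved, stated in full; the proofs are below) =====
def Claim_equal_pdb_split : Prop := ∀ (pdb_data : List String) (option : Int), Dom_pdb_split pdb_data option → Spec_pdb_split pdb_data option (pdb_split pdb_data option)

-- ===== LEMMAS AND PROOFS =====

theorem loopA_other (o : Int) (h0 : (o == 0) = false) (h1 : (o == 1) = false) :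
    ∀ (xs : List String) (ts : Int) (data : List String), pdbLoopA o ts data xs = data := by
  intro xs
  induction xs with
  | nil => intro ts data; rfl
  | cons x xs ih =>
    intro ts data
    simp only [pdbLoopA, h0, h1, Bool.false_and]
    split_ifs <;> first | exact ih _ _ | simp_all

theorem loopA_one_after : ∀ (xs : List String) (data : List String),
    pdbLoopA 1 1 data xs = data ++ xs.filter startsRec := by
  intro xs
  induction xs with
  | nil => intro data; simp [pdbLoopA]
  | cons x xs ih =>
    intro data
    by_cases hR : startsRec x
    · simp [pdbLoopA, hR, ih]
    · simp [pdbLoopA, hR, ih]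

theorem loopA_one_before : ∀ (xs : List String) (data : List String),
    pdbLoopA 1 0 data xs = data ++
      (match (xs.filter startsRec).findIdx? (fun l => PySem.Str.startswith l "TER") with
       | none => []
       | some i => (xs.filter startsRec).drop (i + 1)) := by
  intro xs
  induction xs with
  | nil => intro data; simp [pdbLoopA]
  | cons x xs ih =>
    intro data
    by_cases hR : startsRec x
    · by_cases hT : PySem.Str.startswith x "TER"
      · simp at hT
        simp [pdbLoopA, hR, hT, loopA_one_after, List.findIdx?_cons]
      · simp only [PySem.Str.startswith_eq] at hT
        simp only [pdbLoopA, hR, if_true, List.filter_cons, List.findIdx?_cons, ih]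
        simp only [PySem.Str.startswith_eq, hT]
        simp only [Bool.false_and, Int.reduceEq, Bool.and_false, if_false]
        cases h : (xs.filter startsRec).findIdx? (fun l => PySem.Chars.startswith l.toList "TER".toList) <;>
          simp [h, hT, ih]
    · simp [pdbLoopA, hR, ih, List.filter_cons]

theorem loopA_zero : ∀ (xs : List String) (data : List String),
    pdbLoopA 0 0 data xs = data ++
      (match (xs.filter startsRec).findIdx? (fun l => PySem.Str.startswith l "TER") with
       | none => xs.filter startsRec
       | some i => (xs.filter startsRec).take (i + 1)) := by
  intro xs
  induction xs with
  | nil => intro data; simp [pdbLoopA]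
  | cons x xs ih =>
    intro data
    by_cases hR : startsRec x
    · by_cases hT : PySem.Str.startswith x "TER"
      · simp at hT
        simp [pdbLoopA, hR, hT, List.findIdx?_cons]
      · simp only [PySem.Str.startswith_eq] at hT
        simp only [pdbLoopA, hR, if_true, List.filter_cons, List.findIdx?_cons, ih]
        simp only [PySem.Str.startswith_eq, hT]
        simp only [Bool.false_and, Int.reduceEq, Bool.and_false, if_false]
        cases h : (xs.filter startsRec).findIdx? (fun l => PySem.Chars.startswith l.toList "TER".toList) <;>
          simp [h, hT, ih, List.append_assoc]
    · simp [pdbLoopA, hR, ih, List.filter_cons]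

-- ===== VERDICT (by name: the statement is the Claim_ definition above) =====
theorem pdb_split_spec : Claim_equal_pdb_split := by
  intro pdb_data option _
  unfold Spec_pdb_split pdb_split pdb_split_alt
  by_cases h0 : option = 0
  · subst h0
    rw [loopA_zero]
    cases h : (pdb_data.filter startsRec).findIdx? (fun l => PySem.Str.startswith l "TER") <;>
      simp only [h, List.nil_append] <;> rfl
  · by_cases h1 : option = 1
    · subst h1
      rw [loopA_one_before]
      cases h : (pdb_data.filter startsRec).findIdx? (fun l => PySem.Str.startswith l "TER") <;>
        simp only [h, List.nil_append] <;> rfl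
    · rw [loopA_other option (by simp [h0]) (by simp [h1])]
      simp [h0, h1]
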